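-- pv_equiv track=rewrite | github.com/yubinbai/Codejam | round1A 2013/energy/main3.py | getGain
-- ===== SOURCE A (Python) =====
-- def getGain(E, R, N, value):
--     if R > E:
--         R = E
--     use = [E]
--     for i in range(1, len(value)):
--         use.append(R)
--         for j in range(i - 1, -1, -1):
--             if value[j] >= value[i]:
--                 break
--             if use[j] + use[i] < E:
--                 use[i] += use[j]
--                 use[j] = 0
--             else:
--                 use[j] -= E - use[i]
--                 use[i] = E
--                 break
--     currGain = sum([value[i] * use[i] for i in range(len(value))])
--     return currGain
-- ===== SOURCE B (Python) =====
-- def getGain(E, R, N, value):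
--     # Monotonic stack of (value, unused-energy) pairs: consumed entries are
--     # popped instead of being left as zeros, so each element is pushed and
--     # popped at most once.
--     if not value:
--         return 0
--     r = E if R > E else R
--     stack = [(value[0], E)]
--     for v in value[1:]:
--         cur = r
--         while stack:
--             v2, u2 = stack[-1]
--             if v2 >= v:
--                 break
--             if u2 + cur < E:
--                 cur += u2
--                 stack.pop()
--             else:
--                 stack[-1] = (v2, u2 - (E - cur))
--                 cur = E
--                 break
--         stack.append((v, cur))
--     return sum(v * u for v, u in stack)
-- ===== Notes on version B (the rewrite author's own statement) =====
-- stated objective: alternative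
-- what changed: Replaces A's backward rescan over the whole use-array at every element (consumed entries stay as zeros and are walked over again) by a monotonic stack of (value, unused-energy) pairs from which consumed entries are popped, so each element is pushed and popped at most once (intended as faster; a timing run measured 1.63x at the largest size but not consistently >=1.5x across inputs).
import Mathlib
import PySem

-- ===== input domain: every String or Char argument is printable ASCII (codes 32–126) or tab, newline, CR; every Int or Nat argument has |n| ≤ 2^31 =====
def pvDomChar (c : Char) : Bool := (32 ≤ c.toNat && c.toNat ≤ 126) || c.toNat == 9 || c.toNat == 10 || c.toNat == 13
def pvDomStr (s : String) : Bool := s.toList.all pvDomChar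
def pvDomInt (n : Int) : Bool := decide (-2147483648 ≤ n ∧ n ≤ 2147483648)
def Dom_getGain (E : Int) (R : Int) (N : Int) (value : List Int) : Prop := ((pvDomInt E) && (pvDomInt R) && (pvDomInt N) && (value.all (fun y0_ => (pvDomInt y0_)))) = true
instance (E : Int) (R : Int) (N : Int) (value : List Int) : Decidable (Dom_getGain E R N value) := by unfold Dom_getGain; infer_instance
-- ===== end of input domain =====

-- B replaces A's backward rescan over the whole use-array by a monotonic stack of
-- (value, unused-energy) pairs from which consumed entries are popped once (alternative algorithm).


-- ===== PORT A =====
-- inner loop of A ('for j in range(i-1, -1, -1)'): `front` is use[0..i-1], `cur` is use[i]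
def innerA (E vi : Int) (value : List Int) : Nat → List Int → Int → (List Int × Int)
  | j, front, cur =>
    if value.getD j 0 ≥ vi then (front, cur)
    else if front.getD j 0 + cur < E then
      match j with
      | 0 => (front.set 0 0, cur + front.getD 0 0)
      | k+1 => innerA E vi value k (front.set (k+1) 0) (cur + front.getD (k+1) 0)
    else (front.set j (front.getD j 0 - (E - cur)), E)

-- outer loop of A ('for i in range(1, len(value))'): current index is i = k+1, `use` holds use[0..k]
def buildA (E R : Int) (value : List Int) (k : Nat) (use : List Int) : List Int :=
  if k + 1 < value.length then
    let res := innerA E (value.getD (k+1) 0) value k use R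
    buildA E R value (k+1) (res.1 ++ [res.2])
  else use
termination_by value.length - k

def getGain (E : Int) (R : Int) (N : Int) (value : List Int) : Int :=
  let R' := if R > E then E else R
  let use := buildA E R' value 0 [E]
  (List.zipWith (· * ·) value use).sum

-- ===== PORT B =====
-- inner while-loop of B: consume smaller earlier entries off the stack (head = top of stack)
def scanB (E vi : Int) : List (Int × Int) → Int → (List (Int × Int) × Int)
  | [], cur => ([], cur)
  | (v2, u2) :: rest, cur =>
    if v2 ≥ vi then ((v2, u2) :: rest, cur)
    else if u2 + cur < E then scanB E vi rest (cur + u2)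
    else ((v2, u2 - (E - cur)) :: rest, E)

def getGain_alt (E : Int) (R : Int) (N : Int) (value : List Int) : Int :=
  match value with
  | [] => 0
  | v0 :: rest =>
    let r := if R > E then E else R
    let stack := rest.foldl (fun st v =>
      let res := scanB E v st r
      (v, res.2) :: res.1) [(v0, E)]
    (stack.map (fun p => p.1 * p.2)).sum

-- ===== PRECONDITION & SPEC =====
def Spec_getGain (E : Int) (R : Int) (N : Int) (value : List Int) (out : Int) : Prop := out = getGain_alt E R N value
instance (E : Int) (R : Int) (N : Int) (value : List Int) (out : Int) : Decidable (Spec_getGain E R N value out) := by unfold Spec_getGain; infer_instance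

-- ===== CLAIM (what is proved, stated in full; the proofs are below) =====
def Claim_equal_getGain : Prop := ∀ (E : Int) (R : Int) (N : Int) (value : List Int), Dom_getGain E R N value → Spec_getGain E R N value (getGain E R N value)

-- ===== LEMMAS AND PROOFS =====

-- A's inner loop rephrased on the top-first list of (value, use) pairs: consumed entries stay as (v, 0)
def scanL (E vi : Int) : List (Int × Int) → Int → (List (Int × Int) × Int)
  | [], cur => ([], cur)
  | (v, u) :: t, cur =>
    if v ≥ vi then ((v, u) :: t, cur)
    else if u + cur < E then
      let res := scanL E vi t (cur + u)
      ((v, 0) :: res.1, res.2)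
    else ((v, u - (E - cur)) :: t, E)

-- RelAB b p s : the stack s is the A-state p (top-first) with consumed (v,0) entries dropped;
-- every dropped entry's value is < the value of the nearest surviving entry above it (bound b)
inductive RelAB : Option Int → List (Int × Int) → List (Int × Int) → Prop
  | nil : ∀ b, RelAB b [] []
  | live : ∀ b v u p s, RelAB (some v) p s → RelAB b ((v, u) :: p) ((v, u) :: s)
  | dead : ∀ m v p s, RelAB (some m) p s → v < m → RelAB (some m) ((v, 0) :: p) s

lemma scanL_fst (E vi : Int) : ∀ (p : List (Int × Int)) (cur : Int),
    (scanL E vi p cur).1.map Prod.fst = p.map Prod.fst := by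
  intro p
  induction p with
  | nil => intro cur; simp [scanL]
  | cons hd t ih =>
    obtain ⟨v, u⟩ := hd
    intro cur
    simp only [scanL]
    split_ifs with h1 h2
    · simp
    · simp [ih]
    · simp

lemma zip_concat (value : List Int) : ∀ (f : List Int) (u : Int), f.length < value.length →
    value.zip (f ++ [u]) = value.zip f ++ [(value.getD f.length 0, u)] := by
  induction value with
  | nil => intro f u h; simp at h
  | cons a as ih =>
    intro f u h
    cases f with
    | nil => simp [List.zip]
    | cons b f' =>
      simp only [List.length_cons] at h
      simp [List.zip_cons_cons, ih f' u (by omega)]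

lemma zip_map_fst_take (value : List Int) : ∀ (f : List Int), f.length ≤ value.length →
    (value.zip f).map Prod.fst = value.take f.length := by
  induction value with
  | nil => intro f h; cases f <;> simp_all
  | cons a as ih =>
    intro f h
    cases f with
    | nil => simp
    | cons b f' =>
      simp only [List.length_cons] at h
      simp [List.zip_cons_cons, ih f' (by omega)]

lemma zip_of_map_fst (value : List Int) : ∀ (w : List (Int × Int)),
    w.map Prod.fst = value.take w.length → value.zip (w.map Prod.snd) = w := by
  induction value with
  | nil => intro w h; cases w <;> simp_all
  | cons a as ih =>
    intro w h
    cases w with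
    | nil => simp
    | cons p w' =>
      obtain ⟨x, y⟩ := p
      simp only [List.map_cons, List.length_cons, List.take_succ_cons, List.cons.injEq] at h
      simp [List.zip_cons_cons, h.1, ih w' h.2]

-- bridge: A's index-based inner loop = scanL on the reversed zip
lemma innerA_spec (E vi : Int) (value : List Int) : ∀ (k : Nat) (f rest : List Int) (cur : Int),
    f.length = k + 1 → f.length ≤ value.length →
    innerA E vi value k (f ++ rest) cur =
      ((scanL E vi ((value.zip f).reverse) cur).1.reverse.map Prod.snd ++ rest,
       (scanL E vi ((value.zip f).reverse) cur).2) := by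
  intro k
  induction k with
  | zero =>
    intro f rest cur hflen hle
    obtain ⟨f0, u, rfl⟩ := (List.eq_nil_or_concat f).resolve_left (fun h => by simp [h] at hflen)
    simp only [List.concat_eq_append] at hflen hle ⊢
    have hf0 : f0 = [] := by simpa using hflen
    subst hf0
    rw [zip_concat value [] u (by simpa using hle)]
    simp only [List.nil_append, List.zip_nil_right, List.length_nil, List.reverse_cons,
      List.reverse_nil]
    simp only [innerA, scanL, List.cons_append, List.nil_append, List.getD_cons_zero]
    split_ifs with h1 h2 <;> simp
  | succ k ih =>
    intro f rest cur hflen hle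
    obtain ⟨f0, u, rfl⟩ := (List.eq_nil_or_concat f).resolve_left (fun h => by simp [h] at hflen)
    simp only [List.concat_eq_append] at hflen hle ⊢
    have hf0 : f0.length = k + 1 := by simp at hflen; omega
    have hle0 : f0.length ≤ value.length := by simp at hle; omega
    rw [List.append_assoc, List.singleton_append]
    rw [zip_concat value f0 u (by simp at hle; omega)]
    rw [hf0]
    simp only [List.reverse_append, List.reverse_cons, List.reverse_nil, List.nil_append,
      List.singleton_append]
    have hget : (f0 ++ u :: rest).getD (k + 1) 0 = u := by
      simp [List.getD, hf0]
    have hset : ∀ x : Int, (f0 ++ u :: rest).set (k + 1) x = f0 ++ x :: rest := by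
      intro x
      rw [List.set_append_right _ _ (by omega)]
      simp [hf0]
    simp only [innerA, scanL]
    rw [hget]
    split_ifs with h1 h2
    · simp [List.map_snd_zip hle0, List.append_assoc]
    · rw [hset 0, ih f0 (0 :: rest) (cur + u) hf0 hle0]
      simp
    · rw [hset _]
      simp [List.map_snd_zip hle0, List.append_assoc]

-- core: scanning the full A-state and scanning the stack agree and preserve RelAB
lemma scan_rel (E vi : Int) : ∀ {b p s}, RelAB b p s →
    ∀ cur, (∀ m, b = some m → m < vi ∧ cur < E) →
    (scanL E vi p cur).2 = (scanB E vi s cur).2 ∧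
    RelAB (some vi) (scanL E vi p cur).1 (scanB E vi s cur).1 := by
  intro b p s h
  induction h with
  | nil b => intro cur hg; exact ⟨rfl, RelAB.nil _⟩
  | live b v u p s hrel ih =>
    intro cur hg
    simp only [scanL, scanB]
    split_ifs with h1 h2
    · exact ⟨rfl, RelAB.live _ _ _ _ _ hrel⟩
    · have hrec := ih (cur + u) (fun m hm => by
        injection hm with hm; subst hm; exact ⟨lt_of_not_ge h1, by omega⟩)
      exact ⟨hrec.1, RelAB.dead _ _ _ _ hrec.2 (lt_of_not_ge h1)⟩
    · exact ⟨rfl, RelAB.live _ _ _ _ _ hrel⟩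
  | dead m v p s hrel hvm ih =>
    intro cur hg
    have hm := hg m rfl
    have hrec := ih cur (fun m' hm' => by injection hm' with hm'; subst hm'; exact hm)
    simp only [scanL]
    rw [if_neg (by omega : ¬ v ≥ vi), if_pos (by omega : (0:Int) + cur < E)]
    simp only [add_zero]
    exact ⟨hrec.1, RelAB.dead _ _ _ _ hrec.2 (lt_trans hvm hm.1)⟩

lemma rel_sum : ∀ {b p s}, RelAB b p s →
    (p.map (fun x : Int × Int => x.1 * x.2)).sum = (s.map (fun x : Int × Int => x.1 * x.2)).sum := by
  intro b p s h
  induction h with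
  | nil => rfl
  | live b v u p s _ ih => simp [ih]
  | dead m v p s _ _ ih => simp [ih]

lemma build_rel (E R' : Int) (value : List Int) :
    ∀ (n k : Nat) (use : List Int) (stack : List (Int × Int)),
    value.length - k = n → use.length = k + 1 → k + 1 ≤ value.length →
    RelAB none ((value.zip use).reverse) stack →
    RelAB none ((value.zip (buildA E R' value k use)).reverse)
      ((value.drop (k+1)).foldl (fun st v =>
        let res := scanB E v st R'
        (v, res.2) :: res.1) stack) := by
  intro n
  induction n with
  | zero =>
    intro k use stack hn hlen hle hrel
    rw [buildA, if_neg (by omega), List.drop_eq_nil_of_le (by omega)]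
    exact hrel
  | succ n ihn =>
    intro k use stack hn hlen hle hrel
    by_cases h : k + 1 < value.length
    · rw [buildA, if_pos h, List.drop_eq_getElem_cons h, List.foldl_cons]
      have hgetd : value[k+1] = value.getD (k+1) 0 := by
        simp [List.getD, List.getElem?_eq_getElem h]
      have hres := innerA_spec E (value.getD (k+1) 0) value k use [] R' hlen (by omega)
      simp only [List.append_nil] at hres
      have hQfst := scanL_fst E (value.getD (k+1) 0) ((value.zip use).reverse) R'
      have hQlen : (scanL E (value.getD (k+1) 0) ((value.zip use).reverse) R').1.length
          = k + 1 := by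
        have := congrArg List.length hQfst
        simp only [List.length_map] at this
        rw [this, List.length_reverse, List.length_zip]
        omega
      have hQzip : value.zip ((scanL E (value.getD (k+1) 0) ((value.zip use).reverse) R').1.reverse.map Prod.snd)
          = (scanL E (value.getD (k+1) 0) ((value.zip use).reverse) R').1.reverse := by
        apply zip_of_map_fst
        rw [List.map_reverse, hQfst, List.map_reverse, List.reverse_reverse,
          zip_map_fst_take value use (by omega), List.length_reverse, hQlen, hlen]
      have hsr := scan_rel E (value.getD (k+1) 0) hrel R' (fun m hm => by simp at hm)
      have hlen' : ((scanL E (value.getD (k+1) 0) ((value.zip use).reverse) R').1.reverse.map Prod.snd).length = k + 1 := by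
        simp only [List.length_map, List.length_reverse, hQlen]
      rw [hres, hgetd]
      simp only []
      refine ihn (k + 1) _ _ (by omega) (by simp only [List.length_append, List.length_cons, List.length_nil, hlen']) (by omega) ?_
      rw [zip_concat value _ _ (by rw [hlen']; omega), hlen', List.reverse_append]
      simp only [List.reverse_cons, List.reverse_nil, List.nil_append, List.singleton_append]
      rw [hQzip, List.reverse_reverse]
      rw [hsr.1]
      exact RelAB.live _ _ _ _ _ hsr.2
    · rw [buildA, if_neg h, List.drop_eq_nil_of_le (by omega)]
      exact hrel

-- ===== VERDICT (by name: the statement is the Claim_ definition above) =====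
theorem getGain_spec : Claim_equal_getGain := by
  unfold Claim_equal_getGain
  intro E R N value _hdom
  unfold Spec_getGain
  cases value with
  | nil => simp [getGain, getGain_alt]
  | cons v0 rest =>
    simp only [getGain, getGain_alt]
    have hrel0 : RelAB none (((v0 :: rest).zip [E]).reverse) [(v0, E)] := by
      simp only [List.zip_cons_cons, List.zip_nil_right, List.reverse_cons, List.reverse_nil,
        List.nil_append]
      exact RelAB.live _ _ _ _ _ (RelAB.nil _)
    have hb := build_rel E (if R > E then E else R) (v0 :: rest) ((v0 :: rest).length - 0) 0
      [E] [(v0, E)] rfl (by simp) (by simp) hrel0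
    have hsum := rel_sum hb
    simp only [List.drop_succ_cons, List.drop_zero] at hsum
    rw [show List.zipWith (· * ·) (v0 :: rest) (buildA E (if R > E then E else R) (v0 :: rest) 0 [E])
        = ((v0 :: rest).zip (buildA E (if R > E then E else R) (v0 :: rest) 0 [E])).map
          (fun p => p.1 * p.2) by simp [List.zip, List.map_zipWith]]
    rw [← List.sum_reverse, ← List.map_reverse]
    exact hsum
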